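-- pv_equiv track=rewrite | github.com/cegis-p-repair/cegis-p-repair | policy_repair_z3_multi_io.py | generic_prefix_excluding
-- ===== SOURCE A (Python) =====
-- from typing import List, Dict, Tuple, Optional, Set, Any
--
-- def generic_prefix_excluding(goods: List[str], bad: str) -> Optional[str]:
--     """
--     Service-agnostic prefix finder: choose the shortest prefix that covers all goods but excludes bad.
--     We limit cut points to '/', ':' or the full common prefix.
--     """
--     if not goods:
--         return None
--     common = goods[0]
--     for g in goods[1:]:
--         while not g.startswith(common) and common:
--             common = common[:-1]
--         if not common:
--             break
--     # consider boundaries at '/', ':'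
--     cuts = {i for i,c in enumerate(common, start=1) if c in ["/", ":"]}
--     if common:
--         cuts.add(len(common))
--     for i in sorted(cuts):
--         pref = common[:i]
--         if not bad.startswith(pref):
--             return pref
--     return None
-- ===== SOURCE B (Python) =====
-- def generic_prefix_excluding(goods, bad):
--     """
--     Same task, different strategy: the common prefix of all goods equals the
--     common prefix of just min(goods) and max(goods) (lexicographic extremes);
--     then a single left-to-right walk over that prefix tries each cut point
--     ('/' or ':' boundary, or the full prefix) in increasing order.
--     """
--     if not goods:
--         return None
--     lo, hi = min(goods), max(goods)
--     common = ""
--     for x, y in zip(lo, hi):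
--         if x != y:
--             break
--         common += x
--     pref = ""
--     for idx, c in enumerate(common):
--         pref += c
--         if c in "/:" or idx == len(common) - 1:
--             if not bad.startswith(pref):
--                 return pref
--     return None
-- ===== Notes on version B (the rewrite author's own statement) =====
-- stated objective: alternative
-- what changed: B replaces A's iterative prefix-shrinking over every string by the lexicographic min/max trick (LCP of all strings = LCP of min(goods) and max(goods), computed by one zip walk) and replaces A's set-comprehension + sorted() cut enumeration by a single left-to-right walk over the common prefix that tries each '/'/':'/full-length cut in order.
import Mathlib
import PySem

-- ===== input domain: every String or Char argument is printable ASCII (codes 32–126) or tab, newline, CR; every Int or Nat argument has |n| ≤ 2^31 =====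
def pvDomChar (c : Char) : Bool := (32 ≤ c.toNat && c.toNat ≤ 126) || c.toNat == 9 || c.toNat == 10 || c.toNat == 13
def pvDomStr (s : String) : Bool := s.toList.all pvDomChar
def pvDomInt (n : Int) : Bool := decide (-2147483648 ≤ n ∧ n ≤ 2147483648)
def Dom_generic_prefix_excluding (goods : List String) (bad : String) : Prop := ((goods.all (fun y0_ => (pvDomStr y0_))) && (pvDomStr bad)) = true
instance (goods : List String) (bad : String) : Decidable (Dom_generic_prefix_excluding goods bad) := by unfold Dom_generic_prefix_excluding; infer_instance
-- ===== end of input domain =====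

-- B replaces A's per-string prefix shrinking by LCP(min(goods), max(goods)) and A's
-- set/sorted cut enumeration by one left-to-right walk over the common prefix (alternative decomposition).

-- ===== PORT A =====
-- A's inner `while not g.startswith(common) and common: common = common[:-1]`
def pvShrink (g : List Char) (common : List Char) : List Char :=
  if PySem.Chars.startswith g common = false ∧ common ≠ [] then
    pvShrink g common.dropLast
  else common
termination_by common.length
decreasing_by
  rename_i h
  have hne := h.2
  have : 0 < common.length := List.length_pos_of_ne_nil hne
  simp [List.length_dropLast]; omega

-- A's `for g in goods[1:]: … if not common: break`
def pvCommonLoopA (common : List Char) : List String → List Char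
  | [] => common
  | g :: rest =>
    let common' := pvShrink g.toList common
    if common' = [] then common' else pvCommonLoopA common' rest

-- A's `for i in sorted(cuts): pref = common[:i]; if not bad.startswith(pref): return pref`
def pvCutLoopA (common bad : List Char) : List Int → Option String
  | [] => none
  | i :: rest =>
    let pref := PySem.List.slice common none (some i)
    if PySem.Chars.startswith bad pref = false then some (String.ofList pref)
    else pvCutLoopA common bad rest

def generic_prefix_excluding (goods : List String) (bad : String) : Option String :=
  match goods with
  | [] => none
  | g0 :: gs =>
    let common := pvCommonLoopA g0.toList gs
    -- `cuts = {i for i,c in enumerate(common, start=1) if c in ["/", ":"]}`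
    let cuts : PySem.Set Int := PySem.Set.ofList ((PySem.List.enumerate common 1).filterMap
        (fun p => if p.2 ∈ ['/', ':'] then some p.1 else none))
    let cuts := if common ≠ [] then PySem.Set.add cuts (common.length : Int) else cuts
    pvCutLoopA common bad.toList (PySem.List.sorted cuts (fun x => x) false)

-- ===== PORT B =====
-- B's `for x, y in zip(lo, hi): if x != y: break; common += x`
def pvLcp : List Char → List Char → List Char
  | a :: as, b :: bs => if a = b then a :: pvLcp as bs else []
  | _, _ => []

-- B's `for idx, c in enumerate(common): pref += c; if c in "/:" or idx == len(common)-1: …`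
def pvScanB (bad : List Char) (pref : List Char) : List Char → Option String
  | [] => none
  | c :: rest =>
    if (c = '/' ∨ c = ':' ∨ rest = []) ∧ PySem.Chars.startswith bad (pref ++ [c]) = false
    then some (String.ofList (pref ++ [c]))
    else pvScanB bad (pref ++ [c]) rest

def generic_prefix_excluding_alt (goods : List String) (bad : String) : Option String :=
  match goods with
  | [] => none
  | _ :: _ =>
    match PySem.List.min? goods (fun x => x), PySem.List.max? goods (fun x => x) with
    | some lo, some hi => pvScanB bad.toList [] (pvLcp lo.toList hi.toList)
    | _, _ => none          -- unreachable: goods is nonempty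

-- ===== PRECONDITION & SPEC =====
def Spec_generic_prefix_excluding (goods : List String) (bad : String) (out : Option String) : Prop := out = generic_prefix_excluding_alt goods bad
instance (goods : List String) (bad : String) (out : Option String) : Decidable (Spec_generic_prefix_excluding goods bad out) := by unfold Spec_generic_prefix_excluding; infer_instance

-- ===== CLAIM (what is proved, stated in full; the proofs are below) =====
def Claim_equal_generic_prefix_excluding : Prop := ∀ (goods : List String) (bad : String), Dom_generic_prefix_excluding goods bad → Spec_generic_prefix_excluding goods bad (generic_prefix_excluding goods bad)

-- ===== LEMMAS AND PROOFS =====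

-- The increasing list of valid cut indices of `common`, starting after position k.
def pvCuts (k : Nat) : List Char → List Int
  | [] => []
  | c :: rest =>
    if c = '/' ∨ c = ':' ∨ rest = [] then ((k : Int) + 1) :: pvCuts (k + 1) rest
    else pvCuts (k + 1) rest

-- ---- pvLcp: greatest common prefix ----
theorem pvLcp_prefix_left : ∀ a b : List Char, pvLcp a b <+: a := by
  intro a
  induction a with
  | nil => intro b; cases b <;> simp [pvLcp]
  | cons x xs ih =>
    intro b
    cases b with
    | nil => simp [pvLcp]
    | cons y ys =>
      simp only [pvLcp]
      split
      · next h => exact List.cons_prefix_cons.mpr ⟨rfl, ih ys⟩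
      · exact List.nil_prefix

theorem pvLcp_prefix_right : ∀ a b : List Char, pvLcp a b <+: b := by
  intro a
  induction a with
  | nil => intro b; cases b <;> simp [pvLcp]
  | cons x xs ih =>
    intro b
    cases b with
    | nil => simp [pvLcp]
    | cons y ys =>
      simp only [pvLcp]
      split
      · next h => subst h; exact List.cons_prefix_cons.mpr ⟨rfl, ih ys⟩
      · exact List.nil_prefix

theorem pvLcp_greatest : ∀ (p a b : List Char), p <+: a → p <+: b → p <+: pvLcp a b := by
  intro p
  induction p with
  | nil => intro a b _ _; exact List.nil_prefix
  | cons c p' ih =>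
    intro a b hpa hpb
    cases a with
    | nil => simp at hpa
    | cons x a' =>
      cases b with
      | nil => simp at hpb
      | cons y b' =>
        obtain ⟨rfl, hpa'⟩ := List.cons_prefix_cons.mp hpa
        obtain ⟨rfl, hpb'⟩ := List.cons_prefix_cons.mp hpb
        simp only [pvLcp]
        split
        · exact List.cons_prefix_cons.mpr ⟨rfl, ih a' b' hpa' hpb'⟩
        · simp_all

-- ---- pvShrink ----
theorem pvPrefix_dropLast {p l : List Char} (h : p <+: l) (hne : p ≠ l) :
    p <+: l.dropLast := by
  obtain ⟨t, rfl⟩ := h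
  cases t with
  | nil => simp at hne
  | cons x ts =>
    rw [List.dropLast_append_cons]
    exact List.prefix_append _ _

theorem pvShrink_spec (g common : List Char) :
    pvShrink g common <+: common ∧ pvShrink g common <+: g ∧
      (∀ p, p <+: common → p <+: g → p <+: pvShrink g common) := by
  fun_induction pvShrink g common with
  | case1 common h ih =>
    obtain ⟨h1, h2, h3⟩ := ih
    have hns : ¬ (common <+: g) := by
      intro hc
      rw [(PySem.Chars.startswith_iff g common).mpr hc] at h
      simp at h
    refine ⟨h1.trans (List.dropLast_prefix _), h2, ?_⟩
    intro p hpc hpg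
    exact h3 p (pvPrefix_dropLast hpc (by rintro rfl; exact hns hpg)) hpg
  | case2 common h =>
    rcases Decidable.not_and_iff_not_or_not.mp h with hs | hne
    · have : PySem.Chars.startswith g common = true := by
        cases hb : PySem.Chars.startswith g common
        · exact absurd hb hs
        · rfl
      exact ⟨List.prefix_refl _, (PySem.Chars.startswith_iff g common).mp this,
        fun p hp _ => hp⟩
    · have : common = [] := Decidable.not_not.mp hne
      subst this
      exact ⟨List.prefix_refl _, List.nil_prefix, fun p hp _ => hp⟩

-- ---- A's outer loop computes the greatest common prefix ----
theorem pvCommonLoopA_spec (l : List String) (common : List Char) :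
    pvCommonLoopA common l <+: common ∧ (∀ g ∈ l, pvCommonLoopA common l <+: g.toList) ∧
      (∀ p, p <+: common → (∀ g ∈ l, p <+: g.toList) → p <+: pvCommonLoopA common l) := by
  induction l generalizing common with
  | nil => exact ⟨List.prefix_refl _, by simp, fun p hp _ => hp⟩
  | cons g rest ih =>
    obtain ⟨s1, s2, s3⟩ := pvShrink_spec g.toList common
    simp only [pvCommonLoopA]
    split
    · next he =>
      rw [he]
      refine ⟨List.nil_prefix, by simp, ?_⟩
      intro p hpc hall
      have := s3 p hpc (hall g (by simp))
      rwa [he] at this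
    · next he =>
      obtain ⟨i1, i2, i3⟩ := ih (pvShrink g.toList common)
      refine ⟨i1.trans s1, ?_, ?_⟩
      · intro g' hg'
        rcases List.mem_cons.mp hg' with rfl | hg'
        · exact i1.trans s2
        · exact i2 g' hg'
      · intro p hpc hall
        exact i3 p (s3 p hpc (hall g (by simp))) (fun g' hg' => hall g' (by simp [hg']))

-- ---- lexicographic betweenness: a common prefix of the extremes prefixes everything between ----
theorem pvBetweenLex : ∀ (p a g b : List Char), p <+: a → p <+: b →
    (a = g ∨ List.Lex (· < ·) a g) → (g = b ∨ List.Lex (· < ·) g b) → p <+: g := by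
  intro p
  induction p with
  | nil => intro a g b _ _ _ _; exact List.nil_prefix
  | cons c p' ih =>
    intro a g b hpa hpb hag hgb
    rcases hag with rfl | hag
    · exact hpa
    rcases hgb with rfl | hgb
    · exact hpb
    cases a with
    | nil => simp at hpa
    | cons x a' =>
      cases b with
      | nil => simp at hpb
      | cons y b' =>
        obtain ⟨rfl, hpa'⟩ := List.cons_prefix_cons.mp hpa
        obtain ⟨rfl, hpb'⟩ := List.cons_prefix_cons.mp hpb
        cases g with
        | nil => cases hag
        | cons d g' =>
          cases hag with
          | cons hag' =>
            cases hgb with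
            | cons hgb' =>
              exact List.cons_prefix_cons.mpr
                ⟨rfl, ih a' g' b' hpa' hpb' (Or.inr hag') (Or.inr hgb')⟩
            | rel hdc => exact absurd hdc (lt_irrefl _)
          | rel hcd =>
            cases hgb with
            | cons hgb' => exact absurd hcd (lt_irrefl _)
            | rel hdc => exact absurd hdc (lt_asymm hcd)

theorem pvBetween : ∀ (p a g b : List Char), p <+: a → p <+: b → a ≤ g → g ≤ b → p <+: g := by
  intro p a g b hpa hpb hag hgb
  refine pvBetweenLex p a g b hpa hpb ?_ ?_
  · rcases lt_or_eq_of_le hag with h | h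
    · exact Or.inr h
    · exact Or.inl h
  · rcases lt_or_eq_of_le hgb with h | h
    · exact Or.inr h
    · exact Or.inl h

-- A's common prefix equals B's min/max LCP
theorem pvCommon_eq_lcp (g0 : String) (gs : List String) (lo hi : String)
    (hlo : PySem.List.min? (g0 :: gs) (fun x => x) = some lo)
    (hhi : PySem.List.max? (g0 :: gs) (fun x => x) = some hi) :
    pvCommonLoopA g0.toList gs = pvLcp lo.toList hi.toList := by
  obtain ⟨r1, r2, r3⟩ := pvCommonLoopA_spec gs g0.toList
  have hprefix_all : ∀ g ∈ g0 :: gs, pvCommonLoopA g0.toList gs <+: g.toList := by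
    intro g hg
    rcases List.mem_cons.mp hg with rfl | hg
    · exact r1
    · exact r2 g hg
  have hlomem : lo ∈ g0 :: gs := PySem.List.min?_mem hlo
  have hhimem : hi ∈ g0 :: gs := PySem.List.max?_mem hhi
  have hmin : ∀ g ∈ g0 :: gs, lo ≤ g := PySem.List.min?_isMin hlo
  have hmax : ∀ g ∈ g0 :: gs, g ≤ hi := PySem.List.max?_isMax hhi
  have hq : ∀ g ∈ g0 :: gs, pvLcp lo.toList hi.toList <+: g.toList := by
    intro g hg
    exact pvBetween _ _ _ _ (pvLcp_prefix_left _ _) (pvLcp_prefix_right _ _)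
      (String.le_iff_toList_le.mp (hmin g hg)) (String.le_iff_toList_le.mp (hmax g hg))
  have h1 : pvCommonLoopA g0.toList gs <+: pvLcp lo.toList hi.toList :=
    pvLcp_greatest _ _ _ (hprefix_all lo hlomem) (hprefix_all hi hhimem)
  have h2 : pvLcp lo.toList hi.toList <+: pvCommonLoopA g0.toList gs :=
    r3 _ (hq g0 (by simp)) (fun g hg => hq g (by simp [hg]))
  exact h1.eq_of_length_le h2.length_le

-- ---- the cut list built by A (set comprehension + add + sorted) is pvCuts 0 ----
theorem pvSet_add_cons {s : List Int} {h x : Int} (hne : x ≠ h) :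
    PySem.Set.add (h :: s) x = h :: PySem.Set.add s x := by
  by_cases hx : x ∈ s <;> simp [PySem.Set.add, PySem.Set.contains, hne, hx]

theorem pvCuts_mem_lt : ∀ (l : List Char) (k : Nat) (i : Int), i ∈ pvCuts k l → (k : Int) < i ∧ i ≤ (k : Int) + l.length := by
  intro l
  induction l with
  | nil => intro k i h; simp [pvCuts] at h
  | cons c rest ih =>
    intro k i h
    simp only [pvCuts] at h
    simp only [List.length_cons]
    split at h
    · rcases List.mem_cons.mp h with rfl | h
      · push_cast; omega
      · have := ih (k + 1) i h
        push_cast at this ⊢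
        omega
    · have := ih (k + 1) i h
      push_cast at this ⊢
      omega

theorem pvCuts_pairwise (l : List Char) (k : Nat) : (pvCuts k l).Pairwise (· < ·) := by
  induction l generalizing k with
  | nil => simp [pvCuts]
  | cons c rest ih =>
    simp only [pvCuts]
    split
    · refine List.Pairwise.cons ?_ (ih (k + 1))
      intro i hi
      have := (pvCuts_mem_lt rest (k + 1) i hi).1
      push_cast at this ⊢
      omega
    · exact ih (k + 1)

theorem pvEnum_filter_eq (l : List Char) (k : Nat) (hne : l ≠ []) :
    PySem.Set.add ((PySem.List.enumerate l ((k : Int) + 1)).filterMap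
        (fun p => if p.2 ∈ ['/', ':'] then some p.1 else none)) ((k : Int) + l.length)
      = pvCuts k l := by
  induction l generalizing k with
  | nil => exact absurd rfl hne
  | cons c rest ih =>
    rw [PySem.List.enumerate_cons]
    cases rest with
    | nil =>
      by_cases hc : c = '/' ∨ c = ':' <;>
        simp [pvCuts, hc, PySem.List.enumerate_nil, PySem.Set.add, PySem.Set.contains]
    | cons r rs =>
      have hcast : (k : Int) + 1 + 1 = ((k + 1 : Nat) : Int) + 1 := by push_cast; ring
      have hxc : (k : Int) + ((c :: r :: rs).length : Int)
          = ((k + 1 : Nat) : Int) + ((r :: rs).length : Int) := by push_cast; simp; ring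
      by_cases hc : c = '/' ∨ c = ':'
      · have hfm : List.filterMap (fun p => if p.2 ∈ ['/', ':'] then some p.1 else none)
            (((k : Int) + 1, c) :: PySem.List.enumerate (r :: rs) ((k : Int) + 1 + 1))
            = ((k : Int) + 1) :: List.filterMap (fun p => if p.2 ∈ ['/', ':'] then some p.1 else none)
              (PySem.List.enumerate (r :: rs) ((k : Int) + 1 + 1)) := by
          simp [hc]
        have hx : ((k : Int) + ((c :: r :: rs).length : Int)) ≠ (k : Int) + 1 := by
          simp; omega
        rw [hfm, pvSet_add_cons hx, hcast, hxc, ih (k + 1) (by simp)]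
        simp [pvCuts, hc]
      · have hfm : List.filterMap (fun p => if p.2 ∈ ['/', ':'] then some p.1 else none)
            (((k : Int) + 1, c) :: PySem.List.enumerate (r :: rs) ((k : Int) + 1 + 1))
            = List.filterMap (fun p => if p.2 ∈ ['/', ':'] then some p.1 else none)
              (PySem.List.enumerate (r :: rs) ((k : Int) + 1 + 1)) := by
          simp [hc]
        rw [hfm, hcast, hxc, ih (k + 1) (by simp)]
        simp [pvCuts, hc]

-- ---- A's cut loop over pvCuts is B's scan ----
theorem pvCutLoop_eq_scan (bad : List Char) : ∀ (rest pref : List Char),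
    pvCutLoopA (pref ++ rest) bad (pvCuts pref.length rest) = pvScanB bad pref rest := by
  intro rest
  induction rest with
  | nil => intro pref; simp [pvCuts, pvCutLoopA, pvScanB]
  | cons c rest ih =>
    intro pref
    have hpref : PySem.List.slice (pref ++ c :: rest) none (some ((pref.length : Int) + 1))
        = pref ++ [c] := by
      rw [show ((pref.length : Int) + 1) = ((pref.length + 1 : Nat) : Int) by push_cast; ring]
      rw [PySem.List.slice_to_natCast]
      rw [show pref ++ c :: rest = (pref ++ [c]) ++ rest by simp]
      exact List.take_left' (by simp)
    by_cases hcond : c = '/' ∨ c = ':' ∨ rest = []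
    · have hcuts : pvCuts pref.length (c :: rest)
          = ((pref.length : Int) + 1) :: pvCuts (pref.length + 1) rest := by
        simp [pvCuts, hcond]
      rw [hcuts]
      simp only [pvCutLoopA, hpref, pvScanB]
      by_cases hsw : PySem.Chars.startswith bad (pref ++ [c]) = false
      · rw [if_pos hsw, if_pos ⟨hcond, hsw⟩]
      · have hsw' : PySem.Chars.startswith bad (pref ++ [c]) = true := by
          cases hb : PySem.Chars.startswith bad (pref ++ [c])
          · exact absurd hb hsw
          · rfl
        rw [if_neg hsw, if_neg (by simp [hsw'])]
        have := ih (pref ++ [c])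
        simpa using this
    · have hcuts : pvCuts pref.length (c :: rest) = pvCuts (pref.length + 1) rest := by
        simp only [pvCuts]
        rw [if_neg hcond]
      have hsc : pvScanB bad pref (c :: rest) = pvScanB bad (pref ++ [c]) rest := by
        simp only [pvScanB]
        rw [if_neg (fun hcc => hcond hcc.1)]
      rw [hcuts, hsc]
      have := ih (pref ++ [c])
      simpa using this

-- ===== VERDICT (by name: the statement is the Claim_ definition above) =====
theorem pvF_pairwise (l : List Char) (s : Int) :
    ((PySem.List.enumerate l s).filterMap
        (fun p => if p.2 ∈ ['/', ':'] then some p.1 else none)).Pairwise (· < ·) := by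
  rw [List.pairwise_filterMap]
  refine (PySem.List.pairwise_lt_enumerate l s).imp ?_
  intro a b hab x hx y hy
  obtain ⟨i, c⟩ := a
  obtain ⟨j, d⟩ := b
  replace hx : x ∈ (if c ∈ ['/', ':'] then some i else none) := hx
  replace hy : y ∈ (if d ∈ ['/', ':'] then some j else none) := hy
  split at hx
  · split at hy
    · rw [Option.mem_def, Option.some.injEq] at hx hy
      subst hx
      subst hy
      exact hab
    · exact absurd hy (by simp)
  · exact absurd hx (by simp)

theorem generic_prefix_excluding_spec : Claim_equal_generic_prefix_excluding := by
  unfold Claim_equal_generic_prefix_excluding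
  intro goods bad _
  unfold Spec_generic_prefix_excluding
  match goods with
  | [] => rfl
  | g0 :: gs =>
    cases hlo : PySem.List.min? (g0 :: gs) (fun x => x) with
    | none => rw [PySem.List.min?_eq_none_iff] at hlo; cases hlo
    | some lo =>
      cases hhi : PySem.List.max? (g0 :: gs) (fun x => x) with
      | none => rw [PySem.List.max?_eq_none_iff] at hhi; cases hhi
      | some hi =>
        have hc := pvCommon_eq_lcp g0 gs lo hi hlo hhi
        simp only [generic_prefix_excluding, generic_prefix_excluding_alt, hlo, hhi, ← hc]
        cases hcm : pvCommonLoopA g0.toList gs with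
        | nil =>
          simp [PySem.List.enumerate_nil, PySem.Set.ofList, PySem.List.sorted,
            pvCutLoopA, pvScanB]
        | cons c cs =>
          rw [← hcm]
          have hne : pvCommonLoopA g0.toList gs ≠ [] := by rw [hcm]; simp
          have hofl : PySem.Set.ofList ((PySem.List.enumerate (pvCommonLoopA g0.toList gs) 1).filterMap
              (fun p => if p.2 ∈ ['/', ':'] then some p.1 else none))
              = (PySem.List.enumerate (pvCommonLoopA g0.toList gs) 1).filterMap
              (fun p => if p.2 ∈ ['/', ':'] then some p.1 else none) :=
            PySem.Set.ofList_eq_self_of_nodup _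
              ((pvF_pairwise _ 1).imp (fun h => ne_of_lt h))
          have henum : (1 : Int) = ((0 : Nat) : Int) + 1 := by norm_num
          have hcuts : (if pvCommonLoopA g0.toList gs ≠ [] then
              PySem.Set.add (PySem.Set.ofList ((PySem.List.enumerate (pvCommonLoopA g0.toList gs) 1).filterMap
                (fun p => if p.2 ∈ ['/', ':'] then some p.1 else none)))
                ((pvCommonLoopA g0.toList gs).length : Int)
              else PySem.Set.ofList ((PySem.List.enumerate (pvCommonLoopA g0.toList gs) 1).filterMap
                (fun p => if p.2 ∈ ['/', ':'] then some p.1 else none)))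
              = pvCuts 0 (pvCommonLoopA g0.toList gs) := by
            rw [if_pos hne, hofl, henum]
            have := pvEnum_filter_eq (pvCommonLoopA g0.toList gs) 0 hne
            simpa using this
          simp only [hcuts]
          have hsorted : PySem.List.sorted (pvCuts 0 (pvCommonLoopA g0.toList gs)) (fun x => x) false
              = pvCuts 0 (pvCommonLoopA g0.toList gs) := by
            apply PySem.List.sorted_eq_self_of_pairwise
            exact (pvCuts_pairwise _ 0).imp (fun h => le_of_lt h)
          rw [hsorted]
          have := pvCutLoop_eq_scan bad.toList (pvCommonLoopA g0.toList gs) []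
          simpa using this
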